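-- pv_equiv track=rewrite | github.com/juancadipe/Grupo8_G38 | reto_4.py | verificar_copias
-- ===== SOURCE A (Python) =====
-- def verificar_copias(billetes,K):
--     billetes_repetidos = 0
--     billetes_detectados = 0
--     menoria = {}
--
--     for posicion, nombre in enumerate(billetes) :
--         if (nombre in menoria and posicion - menoria.get(nombre) <= K):
--             billetes_detectados += 1
--         if (nombre in menoria):
--             billetes_repetidos += 1
--         menoria[nombre] = posicion
--     return billetes_repetidos, billetes_detectados
-- ===== SOURCE B (Python) =====
-- def verificar_copias(billetes, K):
--     index = {}
--     for pos, nombre in enumerate(billetes):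
--         index.setdefault(nombre, []).append(pos)
--     billetes_repetidos = sum(len(ps) - 1 for ps in index.values())
--     billetes_detectados = sum(1 for ps in index.values()
--                               for a, b in zip(ps, ps[1:]) if b - a <= K)
--     return billetes_repetidos, billetes_detectados
-- ===== Notes on version B (the rewrite author's own statement) =====
-- stated objective: alternative
-- what changed: Replaces A's single interleaved scan with a last-seen dict by a two-phase structure: build a name-to-positions index in one pass, then compute repetidos as the sum of (group size - 1) and detectados by counting adjacent position gaps <= K within each group.
import Mathlib
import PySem

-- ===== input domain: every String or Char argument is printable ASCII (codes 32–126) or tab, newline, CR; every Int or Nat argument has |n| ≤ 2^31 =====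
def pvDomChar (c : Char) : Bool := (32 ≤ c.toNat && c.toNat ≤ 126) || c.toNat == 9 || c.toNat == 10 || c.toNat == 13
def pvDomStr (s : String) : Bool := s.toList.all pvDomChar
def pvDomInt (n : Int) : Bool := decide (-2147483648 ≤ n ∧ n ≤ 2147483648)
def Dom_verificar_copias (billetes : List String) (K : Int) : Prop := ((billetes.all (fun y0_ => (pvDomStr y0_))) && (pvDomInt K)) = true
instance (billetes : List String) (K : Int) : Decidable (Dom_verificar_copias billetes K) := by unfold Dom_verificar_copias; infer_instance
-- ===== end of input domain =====

-- B replaces A's single interleaved last-seen scan with a two-phase structure (build a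
-- positions index once, then sum group sizes and count adjacent gaps ≤ K per group);
-- objective: alternative decomposition, same asymptotic cost.


-- ===== PORT A =====
-- one loop step of A's for-loop; state = (billetes_repetidos, billetes_detectados, menoria).
-- 'nombre in menoria and posicion - menoria.get(nombre) <= K' (short-circuit) is ported
-- as a match on get?: the comparison is only evaluated when the key is present.
def pasoA (K : Int) (st : Int × Int × PySem.Dict String Int) (p : Int × String) :
    Int × Int × PySem.Dict String Int :=
  let det' := match st.2.2.get? p.2 with
    | some prev => if p.1 - prev ≤ K then st.2.1 + 1 else st.2.1
    | none => st.2.1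
  let rep' := if st.2.2.contains p.2 then st.1 + 1 else st.1
  (rep', det', st.2.2.insert p.2 p.1)

def verificar_copias (billetes : List String) (K : Int) : Int × Int :=
  let r := (PySem.List.enumerate billetes).foldl (pasoA K) (0, 0, PySem.Dict.empty)
  (r.1, r.2.1)

-- ===== PORT B =====
-- index.setdefault(nombre, []).append(pos)  ==  index[nombre] = index.get(nombre, []) + [pos]
def buildIndex (billetes : List String) : PySem.Dict String (List Int) :=
  (PySem.List.enumerate billetes).foldl
    (fun d p => d.modify p.2 [] (· ++ [p.1])) PySem.Dict.empty

-- sum(1 for a, b in zip(ps, ps[1:]) if b - a <= K)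
def countAdjPairs (K : Int) : List Int → Int
  | a :: b :: rest => (if b - a ≤ K then 1 else 0) + countAdjPairs K (b :: rest)
  | _ => 0

def verificar_copias_alt (billetes : List String) (K : Int) : Int × Int :=
  let idx := buildIndex billetes
  ((idx.values.map (fun ps => (ps.length : Int) - 1)).sum,
   (idx.values.map (fun ps => countAdjPairs K ps)).sum)

-- ===== PRECONDITION & SPEC =====
def Spec_verificar_copias (billetes : List String) (K : Int) (out : Int × Int) : Prop := out = verificar_copias_alt billetes K
instance (billetes : List String) (K : Int) (out : Int × Int) : Decidable (Spec_verificar_copias billetes K out) := by unfold Spec_verificar_copias; infer_instance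

-- ===== CLAIM (what is proved, stated in full; the proofs are below) =====
def Claim_equal_verificar_copias : Prop := ∀ (billetes : List String) (K : Int), Dom_verificar_copias billetes K → Spec_verificar_copias billetes K (verificar_copias billetes K)

-- ===== LEMMAS AND PROOFS =====

-- snoc characterisation of countAdjPairs: appending one position adds 1 exactly when
-- its gap to the previous last position is ≤ K.
lemma countAdjPairs_concat (K p : Int) : ∀ (ps : List Int),
    countAdjPairs K (ps ++ [p]) = countAdjPairs K ps +
      (match ps.getLast? with | some l => if p - l ≤ K then (1:Int) else 0 | none => 0)
  | [] => by simp [countAdjPairs]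
  | [a] => by simp [countAdjPairs]
  | a :: b :: t => by
    have ih := countAdjPairs_concat K p (b :: t)
    show (if b - a ≤ K then (1:Int) else 0) + countAdjPairs K ((b :: t) ++ [p]) = _
    rw [ih, List.getLast?_cons_cons]
    show _ = (if b - a ≤ K then (1:Int) else 0) + countAdjPairs K (b :: t) + _
    ring

-- replacing the (unique) entry at key k by (k, w) shifts a sum over the values by g w - g v.
lemma sum_map_snd_replace {ν : Type} (g : ν → Int) (k : String) (w : ν) :
    ∀ (l : List (String × ν)) (v : ν), (l.map Prod.fst).Nodup → (k, v) ∈ l →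
    ((l.map (fun p => if (p.1 == k) = true then (k, w) else p)).map (fun p => g p.2)).sum
      = (l.map (fun p => g p.2)).sum + g w - g v
  | [], v, _, hm => by simp at hm
  | q :: l, v, hnd, hm => by
    simp only [List.map_cons, List.nodup_cons, List.mem_map] at hnd
    by_cases hq : q.1 = k
    · have hqv : q = (k, v) := by
        rcases List.mem_cons.mp hm with h | h
        · exact h.symm
        · exact absurd ⟨(k, v), h, by simp [hq]⟩ hnd.1
      subst hqv
      have hrest : l.map (fun p => if (p.1 == k) = true then (k, w) else p) = l := by
        rw [show l = l.map id by simp]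
        rw [List.map_map]
        apply List.map_congr_left
        intro p hp
        have : p.1 ≠ k := by
          intro h; exact hnd.1 ⟨p, (by simpa using hp), by simpa using h⟩
        simp [this]
      simp only [List.map_cons, List.sum_cons, hrest]
      simp only [beq_self_eq_true, if_true]
      show g w + _ = _
      ring
    · rcases List.mem_cons.mp hm with h | h
      · exact absurd (congrArg Prod.fst h.symm) hq
      · have ih := sum_map_snd_replace g k w l v hnd.2 h
        simp only [List.map_cons, List.sum_cons, beq_iff_eq, if_neg hq]
        simp only [beq_iff_eq] at ih
        rw [ih]; ring

-- the invariant tying A's running state to B's index, by snoc induction on the input.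
lemma main_inv (K : Int) (xs : List String) :
    (buildIndex xs).keys.Nodup ∧
    (∀ n ps, (buildIndex xs).get? n = some ps → ps ≠ []) ∧
    (∀ n, ((PySem.List.enumerate xs).foldl (pasoA K) (0, 0, PySem.Dict.empty)).2.2.get? n
          = ((buildIndex xs).getD n []).getLast?) ∧
    ((PySem.List.enumerate xs).foldl (pasoA K) (0, 0, PySem.Dict.empty)).1
      = ((buildIndex xs).values.map (fun ps => (ps.length : Int) - 1)).sum ∧
    ((PySem.List.enumerate xs).foldl (pasoA K) (0, 0, PySem.Dict.empty)).2.1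
      = ((buildIndex xs).values.map (fun ps => countAdjPairs K ps)).sum := by
  induction xs using List.reverseRecOn with
  | nil =>
    refine ⟨?_, ?_, ?_, rfl, rfl⟩
    · simp [buildIndex, PySem.List.enumerate_nil]
    · intro n ps h
      simp [buildIndex, PySem.List.enumerate_nil, PySem.Dict.get?_empty] at h
    · intro n
      simp [buildIndex, PySem.List.enumerate_nil, PySem.Dict.get?_empty, PySem.Dict.getD_empty]
  | append_singleton xs x ih =>
    obtain ⟨hnd, hne, hmem, hrep, hdet⟩ := ih
    set idx := buildIndex xs with hidx
    set st := (PySem.List.enumerate xs).foldl (pasoA K) (0, 0, PySem.Dict.empty) with hst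
    have henum : PySem.List.enumerate (xs ++ [x]) 0
        = PySem.List.enumerate xs 0 ++ [((xs.length : Int), x)] := by
      rw [PySem.List.enumerate_append]
      simp [PySem.List.enumerate_cons, PySem.List.enumerate_nil]
    have hB : buildIndex (xs ++ [x]) = idx.insert x (idx.getD x [] ++ [(xs.length : Int)]) := by
      rw [buildIndex, henum, List.foldl_append]
      rfl
    have hA : (PySem.List.enumerate (xs ++ [x])).foldl (pasoA K) (0, 0, PySem.Dict.empty)
        = pasoA K st ((xs.length : Int), x) := by
      rw [henum, List.foldl_append]
      rfl
    by_cases hc : idx.contains x = true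
    · -- x already has a group ps ≠ []
      obtain ⟨ps, hps⟩ : ∃ ps, idx.get? x = some ps := by
        have := PySem.Dict.contains_eq_isSome_get? idx x
        rw [hc] at this
        exact Option.isSome_iff_exists.mp this.symm
      have hpsne : ps ≠ [] := hne x ps hps
      have hgetD : idx.getD x [] = ps := PySem.Dict.getD_of_get?_eq_some idx [] hps
      have hmemx : st.2.2.get? x = ps.getLast? := by rw [hmem x, hgetD]
      obtain ⟨lst, hlst⟩ : ∃ l, ps.getLast? = some l :=
        Option.isSome_iff_exists.mp (by simp [List.getLast?_isSome, hpsne])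
      have hitems := PySem.Dict.items_insert_of_contains idx (ps ++ [(xs.length : Int)]) hc
      have hmemitems : (x, ps) ∈ idx.items := PySem.Dict.mem_items_of_get?_eq_some idx hps
      have hcontSt : st.2.2.contains x = true := by
        rw [PySem.Dict.contains_eq_isSome_get?, hmemx, hlst]; rfl
      refine ⟨?_, ?_, ?_, ?_, ?_⟩
      · rw [hB]; exact PySem.Dict.nodup_keys_insert idx x _ hnd
      · intro n qs hq
        rw [hB, PySem.Dict.get?_insert] at hq
        split at hq
        · cases hq; simp
        · exact hne n qs hq
      · intro n
        rw [hA, hB]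
        show (st.2.2.insert x _).get? n = _
        rw [PySem.Dict.get?_insert, PySem.Dict.getD_insert]
        split
        · simp [hgetD]
        · exact hmem n
      · rw [hA, hB]
        show (if st.2.2.contains x then st.1 + 1 else st.1) = _
        rw [hcontSt, if_pos rfl, hrep]
        have hsum := sum_map_snd_replace (fun ps => (ps.length : Int) - 1) x
          (ps ++ [(xs.length : Int)]) idx.items ps hnd hmemitems
        simp only [PySem.Dict.values, hgetD, hitems, List.map_map]
        simp only [List.map_map, Function.comp_def] at hsum ⊢
        rw [hsum]
        simp only [List.length_append, List.length_singleton]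
        push_cast
        ring
      · rw [hA, hB]
        show (match st.2.2.get? x with
          | some prev => if (xs.length : Int) - prev ≤ K then st.2.1 + 1 else st.2.1
          | none => st.2.1) = _
        rw [hmemx, hlst]
        show (if (xs.length : Int) - lst ≤ K then st.2.1 + 1 else st.2.1) = _
        rw [hdet]
        have hsum := sum_map_snd_replace (fun ps => countAdjPairs K ps) x
          (ps ++ [(xs.length : Int)]) idx.items ps hnd hmemitems
        simp only [PySem.Dict.values, hgetD, hitems, List.map_map]
        simp only [List.map_map, Function.comp_def] at hsum ⊢
        have hc2 : countAdjPairs K (ps ++ [(xs.length : Int)])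
            = countAdjPairs K ps + (if (xs.length : Int) - lst ≤ K then (1:Int) else 0) := by
          rw [countAdjPairs_concat, hlst]
        rw [hsum, hc2]
        split_ifs <;> ring
    · -- fresh name: a new singleton group appears at the end
      have hcf : idx.contains x = false := by simpa using hc
      have hgetn : idx.get? x = none := by
        have := PySem.Dict.contains_eq_isSome_get? idx x
        rw [hcf] at this
        cases h : idx.get? x with
        | none => rfl
        | some v => rw [h] at this; simp at this
      have hgetD : idx.getD x [] = [] := PySem.Dict.getD_of_not_contains idx [] hcf
      have hmemx : st.2.2.get? x = none := by rw [hmem x, hgetD]; rfl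
      have hcontSt : st.2.2.contains x = false := by
        rw [PySem.Dict.contains_eq_isSome_get?, hmemx]; rfl
      have hitems := PySem.Dict.items_insert_of_not_contains idx
        (idx.getD x [] ++ [(xs.length : Int)]) hcf
      refine ⟨?_, ?_, ?_, ?_, ?_⟩
      · rw [hB]; exact PySem.Dict.nodup_keys_insert idx x _ hnd
      · intro n qs hq
        rw [hB, PySem.Dict.get?_insert] at hq
        split at hq
        · cases hq; simp
        · exact hne n qs hq
      · intro n
        rw [hA, hB]
        show (st.2.2.insert x _).get? n = _
        rw [PySem.Dict.get?_insert, PySem.Dict.getD_insert]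
        split
        · simp [hgetD]
        · exact hmem n
      · rw [hA, hB]
        show (if st.2.2.contains x then st.1 + 1 else st.1) = _
        rw [hcontSt]
        show st.1 = _
        rw [hrep]
        have hitems' : (idx.insert x [(xs.length : Int)]).items
            = idx.items ++ [(x, [(xs.length : Int)])] := by simpa [hgetD] using hitems
        simp [PySem.Dict.values, hgetD, hitems', List.map_map]
      · rw [hA, hB]
        show (match st.2.2.get? x with
          | some prev => if (xs.length : Int) - prev ≤ K then st.2.1 + 1 else st.2.1
          | none => st.2.1) = _
        rw [hmemx]
        show st.2.1 = _
        rw [hdet]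
        have hitems' : (idx.insert x [(xs.length : Int)]).items
            = idx.items ++ [(x, [(xs.length : Int)])] := by simpa [hgetD] using hitems
        simp [PySem.Dict.values, hgetD, hitems', List.map_map, countAdjPairs]

-- ===== VERDICT (by name: the statement is the Claim_ definition above) =====
theorem verificar_copias_spec : Claim_equal_verificar_copias := by
  intro billetes K _
  obtain ⟨_, _, _, hrep, hdet⟩ := main_inv K billetes
  show _ = _
  unfold verificar_copias verificar_copias_alt
  exact Prod.ext hrep hdet
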